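-- pv_equiv track=rewrite | github.com/raizella/solution | dstorch/cs158/compression/handin/compressor.py | postingSubtractor
-- ===== SOURCE A (Python) =====
-- def postingSubtractor(p) :
--
-- 	fields = p.split(',')
-- 	lastPos = 0
-- 	outputPositionArr = []
--
-- 	for pos in fields :
-- 		outputPositionArr.append(str(int(pos) - lastPos))
-- 		lastPos = int(pos)
--
-- 	return ','.join(outputPositionArr)
-- ===== SOURCE B (Python) =====
-- def postingSubtractor(p):
--     fields = p.split(',')
--
--     def encode(k):
--         # delta-encoding of fields[0..k] as a list of strings, built by
--         # structural recursion on the index (no running accumulator: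
--         # the previous value is re-read from fields[k - 1]).
--         if k == 0:
--             return [str(int(fields[0]))]
--         return encode(k - 1) + [str(int(fields[k]) - int(fields[k - 1]))]
--
--     return ','.join(encode(len(fields) - 1))
-- ===== Notes on version B (the rewrite author's own statement) =====
-- stated objective: alternative
-- what changed: Replaces A's single forward loop threading a lastPos accumulator with an accumulator-free recursion on the field index that builds the result back-to-front, re-reading the previous position from fields[k-1] instead of carrying state.
import Mathlib
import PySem

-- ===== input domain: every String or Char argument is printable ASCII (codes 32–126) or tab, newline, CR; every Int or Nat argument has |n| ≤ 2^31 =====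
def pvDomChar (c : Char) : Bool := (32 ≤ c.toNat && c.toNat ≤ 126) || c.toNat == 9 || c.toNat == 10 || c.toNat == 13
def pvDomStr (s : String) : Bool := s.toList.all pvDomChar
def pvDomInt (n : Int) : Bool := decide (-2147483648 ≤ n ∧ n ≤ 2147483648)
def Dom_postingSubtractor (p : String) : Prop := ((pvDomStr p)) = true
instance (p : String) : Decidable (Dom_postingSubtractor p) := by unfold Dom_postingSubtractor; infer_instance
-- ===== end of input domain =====

-- B replaces A's forward loop with a lastPos accumulator by an accumulator-free recursion on the
-- field index, re-reading fields[k-1] instead of carrying state; return values proved equal.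

-- shared helper: int(x) under Pre_ (which guarantees the parse succeeds); 0 is never used inside Pre_
def pvParse (cs : List Char) : Int := (PySem.Int.ofChars? cs).getD 0

-- ===== PORT A =====
def postingSubtractor (p : String) : String :=
  let fields := PySem.Chars.splitOn p.toList [',']
  let st := fields.foldl
    (fun (st : Int × List (List Char)) pos =>
      (pvParse pos, st.2 ++ [PySem.Int.toChars (pvParse pos - st.1)]))
    (0, [])
  String.ofList (PySem.Chars.join [','] st.2)

-- ===== PORT B =====
-- Source B's encode(k): recursion on the index; fields[k] is in range for all reached k (indices 0..len-1)
def pvEncodeB (fields : List (List Char)) : Nat → List (List Char)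
  | 0 => [PySem.Int.toChars (pvParse (fields.getD 0 []))]
  | k + 1 => pvEncodeB fields k ++
      [PySem.Int.toChars (pvParse (fields.getD (k + 1) []) - pvParse (fields.getD k []))]

def postingSubtractor_alt (p : String) : String :=
  let fields := PySem.Chars.splitOn p.toList [',']
  String.ofList (PySem.Chars.join [','] (pvEncodeB fields (fields.length - 1)))

-- ===== PRECONDITION & SPEC =====
-- Pre_: every comma-separated field parses as a Python int; elsewhere A (and B) raise ValueError.
def Pre_postingSubtractor (p : String) : Prop :=
  ∀ f ∈ PySem.Chars.splitOn p.toList [','], (PySem.Int.ofChars? f).isSome = true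
instance (p : String) : Decidable (Pre_postingSubtractor p) := by unfold Pre_postingSubtractor; infer_instance
def pvWitness_postingSubtractor : String := "1,3,7"
def Spec_postingSubtractor (p : String) (out : String) : Prop := out = postingSubtractor_alt p
instance (p : String) (out : String) : Decidable (Spec_postingSubtractor p out) := by unfold Spec_postingSubtractor; infer_instance

-- ===== CLAIM =====
def Claim_equal_postingSubtractor : Prop := ∀ (p : String), Dom_postingSubtractor p → Pre_postingSubtractor p → Spec_postingSubtractor p (postingSubtractor p)

-- ===== LEMMAS AND PROOFS =====
-- A's loop yields the pairwise differences of the zero-prepended parse list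
lemma postingSubtractor_loop_eq (fs : List (List Char)) :
    ∀ (last : Int) (acc : List (List Char)),
    (fs.foldl
      (fun (st : Int × List (List Char)) pos =>
        (pvParse pos, st.2 ++ [PySem.Int.toChars (pvParse pos - st.1)]))
      (last, acc)).2
    = acc ++ (((last :: fs.map pvParse).zip (fs.map pvParse)).map
        (fun ab => PySem.Int.toChars (ab.2 - ab.1))) := by
  induction fs with
  | nil => intro last acc; simp
  | cons f fs ih =>
      intro last acc
      simp only [List.foldl_cons, List.map_cons, List.zip_cons_cons, List.map_cons]
      rw [ih]
      simp

-- B's recursion yields a prefix of the same pairwise-difference list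
lemma pvEncodeB_eq_take (fields : List (List Char)) (k : Nat) (hk : k < fields.length) :
    pvEncodeB fields k
      = ((((0 : Int) :: fields.map pvParse).zip (fields.map pvParse)).map
          (fun ab => PySem.Int.toChars (ab.2 - ab.1))).take (k + 1) := by
  induction k with
  | zero =>
      obtain ⟨f, fs, rfl⟩ : ∃ f fs, fields = f :: fs := by
        cases fields with
        | nil => simp at hk
        | cons f fs => exact ⟨f, fs, rfl⟩
      simp [pvEncodeB]
  | succ k ih =>
      have hk' : k < fields.length := Nat.lt_of_succ_lt hk
      have hidx : k + 1 < (((((0 : Int) :: fields.map pvParse).zip (fields.map pvParse)).map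
          (fun ab => PySem.Int.toChars (ab.2 - ab.1)))).length := by
        simpa using hk
      have hstep : (((((0 : Int) :: fields.map pvParse).zip (fields.map pvParse)).map
            (fun ab => PySem.Int.toChars (ab.2 - ab.1)))).take (k + 1 + 1)
          = (((((0 : Int) :: fields.map pvParse).zip (fields.map pvParse)).map
            (fun ab => PySem.Int.toChars (ab.2 - ab.1)))).take (k + 1)
            ++ (((((0 : Int) :: fields.map pvParse).zip (fields.map pvParse)).map
            (fun ab => PySem.Int.toChars (ab.2 - ab.1))))[k + 1]?.toList :=
        List.take_add_one
      rw [pvEncodeB, ih hk', hstep]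
      congr 1
      rw [List.getElem?_eq_getElem hidx]
      simp [List.getD_eq_getElem?_getD, List.getElem?_eq_getElem hk,
        List.getElem?_eq_getElem hk']

-- split(',') always returns at least one field, so fields[0] in B is in range
lemma pvGo_ne_nil (sep : List Char) : ∀ (fuel : Nat) (l cur : List Char) (acc : List (List Char)),
    PySem.Chars.splitOn.go sep fuel l cur acc ≠ [] := by
  intro fuel
  induction fuel with
  | zero => intro l cur acc; simp [PySem.Chars.splitOn.go]
  | succ n ih =>
      intro l cur acc
      cases l with
      | nil => simp [PySem.Chars.splitOn.go]
      | cons c rest =>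
          rw [PySem.Chars.splitOn.go]
          split
          · exact ih _ _ _
          · exact ih _ _ _

lemma pvSplitOn_ne_nil (s sep : List Char) : PySem.Chars.splitOn s sep ≠ [] := by
  unfold PySem.Chars.splitOn; exact pvGo_ne_nil _ _ _ _ _

-- ===== VERDICT =====
theorem postingSubtractor_spec : Claim_equal_postingSubtractor := by
  intro p _ _
  show _ = _
  simp only [postingSubtractor, postingSubtractor_alt]
  rw [postingSubtractor_loop_eq]
  have hlen : 0 < (PySem.Chars.splitOn p.toList [',']).length :=
    List.length_pos_of_ne_nil (pvSplitOn_ne_nil _ _)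
  rw [pvEncodeB_eq_take _ _ (by omega)]
  have h1 : (PySem.Chars.splitOn p.toList [',']).length - 1 + 1
      = (PySem.Chars.splitOn p.toList [',']).length := by omega
  rw [h1, List.take_of_length_le (by simp)]
  simp
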